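-- pv_equiv track=rewrite | github.com/skuroda/FindKeyConflicts | find_key_conflicts.py | find_overlap_conflicts
-- ===== SOURCE A (Python) =====
-- def find_overlap_conflicts(all_key_map):
--     keylist = list(all_key_map.keys())
--     keylist.sort()
--     conflicts = {}
--     for key in keylist:
--         for key_nested in keylist:
--             if key_nested.startswith(key + ","):
--                 if key in conflicts:
--                     conflicts[key].append(key_nested)
--                 else:
--                     conflicts[key] = [key_nested]
--     return conflicts
-- ===== SOURCE B (Python) =====
-- def find_overlap_conflicts(all_key_map):
--     keys = sorted(all_key_map)
--     keyset = set(keys)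
--     buckets = {}
--     for k in keys:
--         prefix = ''
--         for ch in k:
--             if ch == ',' and prefix in keyset:
--                 buckets.setdefault(prefix, []).append(k)
--             prefix += ch
--     return {key: buckets[key] for key in keys if key in buckets}
-- ===== Notes on version B (the rewrite author's own statement) =====
-- stated objective: faster
-- what changed: Instead of testing every (key, key_nested) pair with startswith, B scans each key once and, at every comma, looks the accumulated prefix up in a hash set, grouping matches into buckets keyed by prefix; the final dict is read off in sorted key order.
import Mathlib
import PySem

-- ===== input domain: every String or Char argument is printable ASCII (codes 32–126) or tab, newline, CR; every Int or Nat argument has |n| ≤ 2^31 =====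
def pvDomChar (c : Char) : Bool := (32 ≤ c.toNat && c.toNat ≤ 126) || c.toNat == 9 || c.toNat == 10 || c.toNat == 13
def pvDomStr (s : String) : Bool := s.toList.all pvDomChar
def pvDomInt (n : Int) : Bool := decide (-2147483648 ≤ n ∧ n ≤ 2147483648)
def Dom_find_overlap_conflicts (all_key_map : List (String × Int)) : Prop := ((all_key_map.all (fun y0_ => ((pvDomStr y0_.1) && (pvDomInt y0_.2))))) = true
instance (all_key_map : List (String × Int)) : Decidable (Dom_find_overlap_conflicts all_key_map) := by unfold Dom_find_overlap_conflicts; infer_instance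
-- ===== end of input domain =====

-- B replaces A's quadratic all-pairs startswith scan by one pass over each key that, at every
-- comma, looks the accumulated prefix up in a hash set (objective: faster).


-- ===== PORT A =====
def find_overlap_conflicts (all_key_map : List (String × Int)) : List (String × List String) :=
  let keylist := PySem.List.sorted (PySem.Dict.keys (PySem.Dict.ofList all_key_map)) (fun x => x) false
  (keylist.foldl (fun conflicts key =>
    keylist.foldl (fun conflicts key_nested =>
      if PySem.Str.startswith key_nested (key ++ ",") then
        if conflicts.contains key then
          conflicts.modify key [] (fun x => x ++ [key_nested])
        else conflicts.insert key [key_nested]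
      else conflicts) conflicts)
    (PySem.Dict.empty : PySem.Dict String (List String))).items

-- ===== PORT B =====
def find_overlap_conflicts_alt (all_key_map : List (String × Int)) : List (String × List String) :=
  let keys := PySem.List.sorted (PySem.Dict.keys (PySem.Dict.ofList all_key_map)) (fun x => x) false
  let keyset := PySem.Set.ofList keys
  let buckets := keys.foldl (fun buckets k =>
    (k.toList.foldl (fun (st : String × PySem.Dict String (List String)) ch =>
        ((st.1.push ch),
         if ch == ',' && keyset.contains st.1 then
           st.2.modify st.1 [] (fun x => x ++ [k])   -- buckets.setdefault(prefix, []).append(k)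
         else st.2))
      ("", buckets)).2)
    (PySem.Dict.empty : PySem.Dict String (List String))
  -- {key: buckets[key] for key in keys if key in buckets}; the guarded buckets[key] is getD
  keys.foldl (fun out key =>
    if buckets.contains key then out ++ [(key, buckets.getD key [])] else out) []

-- ===== PRECONDITION & SPEC =====
def Spec_find_overlap_conflicts (all_key_map : List (String × Int)) (out : List (String × List String)) : Prop := out = find_overlap_conflicts_alt all_key_map
instance (all_key_map : List (String × Int)) (out : List (String × List String)) : Decidable (Spec_find_overlap_conflicts all_key_map out) := by unfold Spec_find_overlap_conflicts; infer_instance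

-- ===== CLAIM (what is proved, stated in full; the proofs are below) =====
def Claim_equal_find_overlap_conflicts : Prop := ∀ (all_key_map : List (String × Int)), Dom_find_overlap_conflicts all_key_map → Spec_find_overlap_conflicts all_key_map (find_overlap_conflicts all_key_map)

-- ===== LEMMAS AND PROOFS =====

-- the common characterisation both ports are reduced to: for each key of the sorted key list S,
-- the keys of S extending it past a comma, kept only when nonempty
def pvMatches (S : List String) (key : String) : List String :=
  S.filter (fun kn => PySem.Str.startswith kn (key ++ ","))

def pvSpec (S : List String) : List (String × List String) :=
  S.filterMap (fun key => if pvMatches S key = [] then none else some (key, pvMatches S key))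

theorem innerA_in (key : String) (l : List String)
    (d : PySem.Dict String (List String)) (v : List String) :
    l.foldl (fun conflicts key_nested =>
      if PySem.Str.startswith key_nested (key ++ ",") then
        if conflicts.contains key then
          conflicts.modify key [] (fun x => x ++ [key_nested])
        else conflicts.insert key [key_nested]
      else conflicts) (d.insert key v)
    = d.insert key (v ++ l.filter (fun kn => PySem.Str.startswith kn (key ++ ","))) := by
  induction l generalizing v with
  | nil => simp
  | cons kn rest ih =>
    simp only [List.foldl_cons]
    by_cases h : PySem.Str.startswith kn (key ++ ",") = true
    · rw [if_pos h, if_pos (PySem.Dict.contains_insert_self d key v),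
        PySem.Dict.modify, PySem.Dict.getD_insert_self, PySem.Dict.insert_insert_self,
        ih (v ++ [kn])]
      simp only [pysem] at h
      rw [show (key ++ ",").toList = key.toList ++ [','] by simp] at h
      rw [← PySem.Chars.startswith_iff] at h
      simp [h, List.append_assoc]
    · rw [if_neg h, ih v]
      simp only [pysem] at h
      rw [show (key ++ ",").toList = key.toList ++ [','] by simp] at h
      rw [← PySem.Chars.startswith_iff] at h
      simp [h]

theorem startswith_char (kn key : String) :
    (PySem.Str.startswith kn (key ++ ",") = true) ↔ (PySem.Chars.startswith kn.toList (key.toList ++ [',']) = true) := by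
  rw [PySem.Str.startswith_eq, show (key ++ ",").toList = key.toList ++ [','] from by simp]

theorem innerA_out (key : String) (l : List String)
    (d : PySem.Dict String (List String)) (h : d.contains key = false) :
    l.foldl (fun conflicts key_nested =>
      if PySem.Str.startswith key_nested (key ++ ",") then
        if conflicts.contains key then
          conflicts.modify key [] (fun x => x ++ [key_nested])
        else conflicts.insert key [key_nested]
      else conflicts) d
    = (if l.filter (fun kn => PySem.Str.startswith kn (key ++ ",")) = [] then d
       else d.insert key (l.filter (fun kn => PySem.Str.startswith kn (key ++ ",")))) := by
  induction l with
  | nil => simp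
  | cons kn rest ih =>
    simp only [List.foldl_cons]
    by_cases hp : PySem.Str.startswith kn (key ++ ",") = true
    · have hp' := (startswith_char kn key).mp hp
      rw [if_pos hp, if_neg (by simp [h]), innerA_in key rest d [kn]]
      rw [if_neg (by simp [hp'])]
      simp [hp']
    · have hp' : ¬ (PySem.Chars.startswith kn.toList (key.toList ++ [',']) = true) :=
        fun hc => hp ((startswith_char kn key).mpr hc)
      rw [if_neg hp, ih]
      simp [hp']

theorem outerA (S : List String) (l : List String) (d : PySem.Dict String (List String))
    (hnd : d.keys.Nodup) (hl : l.Nodup) (hfresh : ∀ k ∈ l, d.contains k = false) :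
    (l.foldl (fun conflicts key =>
      S.foldl (fun conflicts key_nested =>
        if PySem.Str.startswith key_nested (key ++ ",") then
          if conflicts.contains key then
            conflicts.modify key [] (fun x => x ++ [key_nested])
          else conflicts.insert key [key_nested]
        else conflicts) conflicts) d).items
    = d.items ++ l.filterMap (fun key => if pvMatches S key = [] then none else some (key, pvMatches S key)) := by
  induction l generalizing d with
  | nil => simp
  | cons key rest ih =>
    simp only [List.foldl_cons, List.filterMap_cons]
    rw [innerA_out key S d (hfresh key (List.mem_cons_self))]
    by_cases he : pvMatches S key = []
    · rw [if_pos (by simpa [pvMatches] using he), he]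
      rw [ih d hnd hl.of_cons (fun k hk => hfresh k (List.mem_cons_of_mem _ hk))]
      simp
    · rw [if_neg (by simpa [pvMatches] using he)]
      rw [show List.filter (fun kn => PySem.Str.startswith kn (key ++ ",")) S = pvMatches S key from rfl]
      rw [ih (d.insert key (pvMatches S key))
        (by exact PySem.Dict.nodup_keys_insert d key _ hnd)
        hl.of_cons
        (fun k hk => by
          rw [PySem.Dict.contains_insert]
          have : k ≠ key := by
            rintro rfl; exact (List.nodup_cons.mp hl).1 hk
          simp [this, hfresh k (List.mem_cons_of_mem _ hk)])]
      rw [PySem.Dict.items_insert_of_not_contains d _ (hfresh key (List.mem_cons_self))]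
      rw [if_neg he]
      simp

theorem condStep (pl prel : List Char) (c : Char) (rs : List Char) :
    (prel <+: pl ∧ pl.drop prel.length ++ [','] <+: c :: rs) ↔
    ((pl = prel ∧ c = ',') ∨ (prel ++ [c] <+: pl ∧ pl.drop (prel.length + 1) ++ [','] <+: rs)) := by
  constructor
  · rintro ⟨⟨t, rfl⟩, h2⟩
    rw [List.drop_left] at h2
    cases t with
    | nil =>
      simp only [List.nil_append, List.cons_prefix_cons] at h2
      exact Or.inl ⟨by simp, h2.1.symm⟩
    | cons a t' =>
      simp only [List.cons_append, List.cons_prefix_cons] at h2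
      obtain ⟨rfl, h2⟩ := h2
      refine Or.inr ⟨⟨t', by simp⟩, ?_⟩
      have : (prel ++ a :: t').drop (prel.length + 1) = t' := by
        rw [show prel ++ a :: t' = (prel ++ [a]) ++ t' by simp,
            show prel.length + 1 = (prel ++ [a]).length by simp]
        exact List.drop_left ..
      rw [this]; exact h2
  · rintro (⟨rfl, rfl⟩ | ⟨⟨t, rfl⟩, h2⟩)
    · exact ⟨List.prefix_refl _, by simp⟩
    · constructor
      · exact ⟨c :: t, by simp⟩
      · have : ((prel ++ [c]) ++ t).drop prel.length = c :: t := by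
          rw [show (prel ++ [c]) ++ t = prel ++ (c :: t) by simp]
          rw [List.drop_append_of_le_length (by simp)]
          simp
        rw [this]
        rw [show ((prel ++ [c]) ++ t).drop (prel.length + 1) = t from by
          rw [show prel.length + 1 = (prel ++ [c]).length by simp]; exact List.drop_left ..] at h2
        simpa using h2

theorem innerB (S : List String) (k : String) (p : String) (rest : List Char) :
    ∀ (pre : String) (b : PySem.Dict String (List String)),
    ((rest.foldl (fun (st : String × PySem.Dict String (List String)) ch =>
        ((st.1.push ch),
         if ch == ',' && (PySem.Set.ofList S).contains st.1 then
           st.2.modify st.1 [] (fun l => l ++ [k])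
         else st.2))
      (pre, b)).2).get? p
    = if p ∈ S ∧ pre.toList <+: p.toList ∧ (p.toList.drop pre.toList.length) ++ [','] <+: rest
      then some (b.getD p [] ++ [k]) else b.get? p := by
  induction rest with
  | nil =>
    intro pre b
    have hno : ¬ (p ∈ S ∧ pre.toList <+: p.toList ∧
        (p.toList.drop pre.toList.length) ++ [','] <+: ([] : List Char)) := by
      rintro ⟨-, -, h3⟩
      rw [List.prefix_nil] at h3
      simp at h3
    simp only [List.foldl_nil]
    rw [if_neg hno]
  | cons c rs ih =>
    intro pre b
    simp only [List.foldl_cons]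
    rw [ih, String.toList_push,
      show (pre.toList ++ [c]).length = pre.toList.length + 1 from by simp]
    by_cases hmem : p ∈ S
    · by_cases hL : p.toList = pre.toList ∧ c = ','
      · obtain ⟨hpp, rfl⟩ := hL
        have hpe : p = pre := String.toList_inj.mp hpp
        subst hpe
        have hguard : ((',' == ',') && (PySem.Set.ofList S).contains p) = true := by
          simp only [beq_self_eq_true, Bool.true_and]
          exact (PySem.Set.contains_iff _ _).mpr ((PySem.Set.mem_ofList _ _).mpr hmem)
        conv_lhs => rw [if_neg (show ¬ (p ∈ S ∧ p.toList ++ [','] <+: p.toList ∧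
          p.toList.drop (p.toList.length + 1) ++ [','] <+: rs) from by
            rintro ⟨-, hpre, -⟩
            have := hpre.length_le
            simp at this)]
        rw [if_pos hguard]
        simp only [PySem.Dict.modify]
        rw [PySem.Dict.get?_insert_self]
        conv_rhs => rw [if_pos ⟨hmem, (condStep p.toList p.toList ',' rs).mpr (Or.inl ⟨rfl, rfl⟩)⟩]
      · by_cases hR : pre.toList ++ [c] <+: p.toList ∧ p.toList.drop (pre.toList.length + 1) ++ [','] <+: rs
        · have hne : p ≠ pre := by
            rintro rfl
            have := hR.1.length_le
            simp at this
          conv_lhs => rw [if_pos ⟨hmem, hR⟩]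
          conv_rhs => rw [if_pos ⟨hmem, (condStep p.toList pre.toList c rs).mpr (Or.inr hR)⟩]
          by_cases hguard : ((c == ',') && (PySem.Set.ofList S).contains pre) = true
          · rw [if_pos hguard]
            simp only [PySem.Dict.modify]
            rw [PySem.Dict.getD_insert_of_ne _ _ _ hne]
          · rw [if_neg hguard]
        · conv_lhs => rw [if_neg (show ¬ (p ∈ S ∧ pre.toList ++ [c] <+: p.toList ∧
              p.toList.drop (pre.toList.length + 1) ++ [','] <+: rs) from fun h => hR h.2)]
          conv_rhs => rw [if_neg (show ¬ (p ∈ S ∧ pre.toList <+: p.toList ∧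
              p.toList.drop pre.toList.length ++ [','] <+: c :: rs) from by
            rintro ⟨-, hc⟩
            rcases (condStep p.toList pre.toList c rs).mp hc with h | h
            · exact hL h
            · exact hR h)]
          by_cases hguard : ((c == ',') && (PySem.Set.ofList S).contains pre) = true
          · have hne : p ≠ pre := by
              rintro rfl
              refine hL ⟨rfl, ?_⟩
              have := (Bool.and_eq_true_iff.mp hguard).1
              simpa using this
            rw [if_pos hguard]
            simp only [PySem.Dict.modify]
            rw [PySem.Dict.get?_insert_of_ne _ _ hne]
          · rw [if_neg hguard]
    · conv_lhs => rw [if_neg (fun h => hmem h.1)]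
      conv_rhs => rw [if_neg (fun h => hmem h.1)]
      by_cases hguard : ((c == ',') && (PySem.Set.ofList S).contains pre) = true
      · have hne : p ≠ pre := by
          rintro rfl
          exact hmem ((PySem.Set.mem_ofList S p).mp
            ((PySem.Set.contains_iff _ _).mp (Bool.and_eq_true_iff.mp hguard).2))
        rw [if_pos hguard]
        simp only [PySem.Dict.modify]
        rw [PySem.Dict.get?_insert_of_ne _ _ hne]
      · rw [if_neg hguard]

theorem processB (S : List String) (k : String) (p : String)
    (b : PySem.Dict String (List String)) :
    ((k.toList.foldl (fun (st : String × PySem.Dict String (List String)) ch =>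
        ((st.1.push ch),
         if ch == ',' && (PySem.Set.ofList S).contains st.1 then
           st.2.modify st.1 [] (fun l => l ++ [k])
         else st.2))
      ("", b)).2).get? p
    = if p ∈ S ∧ PySem.Str.startswith k (p ++ ",") = true
      then some (b.getD p [] ++ [k]) else b.get? p := by
  rw [innerB S k p k.toList "" b]
  have heq : ((("" : String)).toList <+: p.toList ∧
      p.toList.drop (("" : String)).toList.length ++ [','] <+: k.toList)
      ↔ PySem.Str.startswith k (p ++ ",") = true := by
    rw [startswith_char k p, PySem.Chars.startswith_iff]
    constructor
    · rintro ⟨-, h⟩; simpa using h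
    · intro h; exact ⟨by simp, by simpa using h⟩
  by_cases h : p ∈ S ∧ PySem.Str.startswith k (p ++ ",") = true
  · rw [if_pos ⟨h.1, heq.mpr h.2⟩, if_pos h]
  · rw [if_neg (fun hc => h ⟨hc.1, heq.mp hc.2⟩), if_neg h]

theorem outerB (S : List String) (l : List String) :
    ∀ (b : PySem.Dict String (List String)) (acc : String → List String),
    (∀ p ∈ S, b.get? p = if acc p = [] then none else some (acc p)) →
    ∀ p ∈ S,
    (l.foldl (fun buckets k =>
      (k.toList.foldl (fun (st : String × PySem.Dict String (List String)) ch =>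
          ((st.1.push ch),
           if ch == ',' && (PySem.Set.ofList S).contains st.1 then
             st.2.modify st.1 [] (fun x => x ++ [k])
           else st.2))
        ("", buckets)).2) b).get? p
    = if acc p ++ l.filter (fun kn => PySem.Str.startswith kn (p ++ ",")) = [] then none
      else some (acc p ++ l.filter (fun kn => PySem.Str.startswith kn (p ++ ","))) := by
  induction l with
  | nil =>
    intro b acc hInv p hp
    simpa using hInv p hp
  | cons k rest ih =>
    intro b acc hInv p hp
    simp only [List.foldl_cons]
    rw [ih _ (fun q => acc q ++ (if PySem.Str.startswith k (q ++ ",") = true then [k] else []))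
      (fun q hq => by
        rw [processB S k q b]
        have hbq : b.getD q [] = acc q := by
          rw [PySem.Dict.getD_eq_get?_getD, hInv q hq]
          by_cases hq0 : acc q = [] <;> simp [hq0]
        beta_reduce
        by_cases hc : PySem.Str.startswith k (q ++ ",") = true
        · rw [if_pos ⟨hq, hc⟩, hbq, if_pos hc, if_neg (by simp)]
        · rw [if_neg (fun hh => hc hh.2), hInv q hq, if_neg hc]
          simp) p hp]
    have hlist : (acc p ++ (if PySem.Str.startswith k (p ++ ",") = true then [k] else [])) ++
        rest.filter (fun kn => PySem.Str.startswith kn (p ++ ",")) =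
        acc p ++ (k :: rest).filter (fun kn => PySem.Str.startswith kn (p ++ ",")) := by
      by_cases hc : PySem.Str.startswith k (p ++ ",") = true
      · rw [startswith_char] at hc
        simp [hc]
      · rw [startswith_char] at hc
        simp only [Bool.not_eq_true] at hc
        simp [hc]
    rw [hlist]

theorem finalFold (S : List String) (l : List String) (buckets : PySem.Dict String (List String))
    (h : ∀ p ∈ l, buckets.get? p = if pvMatches S p = [] then none else some (pvMatches S p)) :
    ∀ (acc : List (String × List String)),
    l.foldl (fun out key => if buckets.contains key then out ++ [(key, buckets.getD key [])] else out) acc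
    = acc ++ l.filterMap (fun key => if pvMatches S key = [] then none else some (key, pvMatches S key)) := by
  induction l with
  | nil => intro acc; simp
  | cons key rest ih =>
    intro acc
    simp only [List.foldl_cons, List.filterMap_cons]
    have hkey := h key (List.mem_cons_self)
    have hrest : ∀ p ∈ rest, buckets.get? p = if pvMatches S p = [] then none else some (pvMatches S p) :=
      fun p hp => h p (List.mem_cons_of_mem _ hp)
    by_cases hm : pvMatches S key = []
    · rw [if_pos hm] at hkey
      have hcont : buckets.contains key = false := by
        rw [PySem.Dict.contains_eq_isSome_get?, hkey]; rfl
      rw [if_neg (by simp [hcont]), ih hrest acc, if_pos hm]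
    · rw [if_neg hm] at hkey
      have hcont : buckets.contains key = true := by
        rw [PySem.Dict.contains_eq_isSome_get?, hkey]; rfl
      have hgd : buckets.getD key [] = pvMatches S key := by
        rw [PySem.Dict.getD_eq_get?_getD, hkey]; rfl
      rw [if_pos hcont, hgd, ih hrest _, if_neg hm]
      simp

theorem A_eq_spec (al : List (String × Int)) :
    find_overlap_conflicts al
    = pvSpec (PySem.List.sorted (PySem.Dict.keys (PySem.Dict.ofList al)) (fun x => x) false) := by
  simp only [find_overlap_conflicts]
  set S := PySem.List.sorted (PySem.Dict.keys (PySem.Dict.ofList al)) (fun x => x) false with hS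
  have hnd : S.Nodup :=
    ((PySem.List.sorted_perm (PySem.Dict.keys (PySem.Dict.ofList al)) (fun x => x) false).nodup_iff).mpr
      (PySem.Dict.nodup_keys_ofList al)
  rw [outerA S S PySem.Dict.empty PySem.Dict.nodup_keys_empty hnd
    (fun kk _ => PySem.Dict.contains_empty kk)]
  simp [pvSpec, PySem.Dict.empty]

theorem B_eq_spec (al : List (String × Int)) :
    find_overlap_conflicts_alt al
    = pvSpec (PySem.List.sorted (PySem.Dict.keys (PySem.Dict.ofList al)) (fun x => x) false) := by
  simp only [find_overlap_conflicts_alt]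
  set S := PySem.List.sorted (PySem.Dict.keys (PySem.Dict.ofList al)) (fun x => x) false with hS
  have hbuck : ∀ p ∈ S,
      (S.foldl (fun buckets k =>
        (k.toList.foldl (fun (st : String × PySem.Dict String (List String)) ch =>
            ((st.1.push ch),
             if ch == ',' && (PySem.Set.ofList S).contains st.1 then
               st.2.modify st.1 [] (fun x => x ++ [k])
             else st.2))
          ("", buckets)).2) (PySem.Dict.empty : PySem.Dict String (List String))).get? p
      = if pvMatches S p = [] then none else some (pvMatches S p) := by
    intro p hp
    have := outerB S S PySem.Dict.empty (fun _ => [])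
      (fun q _ => by simp [PySem.Dict.get?_empty]) p hp
    simpa [pvMatches] using this
  rw [finalFold S S _ hbuck []]
  simp [pvSpec]

-- ===== VERDICT (by name: the statement is the Claim_ definition above) =====
theorem find_overlap_conflicts_spec : Claim_equal_find_overlap_conflicts := by
  intro l _
  unfold Spec_find_overlap_conflicts
  rw [A_eq_spec, B_eq_spec]
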